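-- pv_equiv track=rewrite | github.com/Rhn12/BaekJoon | 백준/Diamond/22347. 공통 괄호 문자열 사전/공통 괄호 문자열 사전.py | find_kth_valid_string
-- ===== SOURCE A (Python) =====
-- def generate_valid_substrings(s):
--     valid_substrings = set()
--     n = len(s)
--     for start in range(n):
--         stack = 0
--         for end in range(start, n):
--             if s[end] == '(':
--                 stack += 1
--             elif s[end] == ')':
--                 stack -= 1
--             if stack < 0:
--                 break
--             substring = s[start:end + 1]
--             if stack == 0:
--                 valid_substrings.add(substring)
--     return valid_substrings
--
-- def find_kth_valid_string(test_cases):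
--     results = []
--     for A, B, K in test_cases:
--         # Generate valid substrings from A and B
--         valid_substrings_A = generate_valid_substrings(A)
--         valid_substrings_B = generate_valid_substrings(B)
--         common_valid_substrings = valid_substrings_A & valid_substrings_B
--         valid_common_substrings = sorted(common_valid_substrings)
--         if len(valid_common_substrings) >= K:
--             results.append(valid_common_substrings[K - 1])
--         else:
--             results.append("-1")
--     return results
-- ===== SOURCE B (Python) =====
-- def is_valid(t):
--     bal = 0
--     for c in t:
--         if c == '(':
--             bal += 1
--         elif c == ')':
--             bal -= 1
--         if bal < 0:
--             return False
--     return bal == 0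
--
--
-- def kth_common(A, B, K):
--     n = len(A)
--     common = sorted({A[i:j] for i in range(n) for j in range(i + 1, n + 1)
--                      if is_valid(A[i:j]) and A[i:j] in B})
--     return common[K - 1] if len(common) >= K else "-1"
--
--
-- def find_kth_valid_string(test_cases):
--     return [kth_common(A, B, K) for A, B, K in test_cases]
-- ===== Notes on version B (the rewrite author's own statement) =====
-- stated objective: simpler
-- what changed: B replaces A's two per-string stack-scans-with-break plus set intersection by one flat comprehension over all substrings of A with a direct validity predicate and Python's substring test 'in B', then indexes the sorted result.
import Mathlib
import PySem

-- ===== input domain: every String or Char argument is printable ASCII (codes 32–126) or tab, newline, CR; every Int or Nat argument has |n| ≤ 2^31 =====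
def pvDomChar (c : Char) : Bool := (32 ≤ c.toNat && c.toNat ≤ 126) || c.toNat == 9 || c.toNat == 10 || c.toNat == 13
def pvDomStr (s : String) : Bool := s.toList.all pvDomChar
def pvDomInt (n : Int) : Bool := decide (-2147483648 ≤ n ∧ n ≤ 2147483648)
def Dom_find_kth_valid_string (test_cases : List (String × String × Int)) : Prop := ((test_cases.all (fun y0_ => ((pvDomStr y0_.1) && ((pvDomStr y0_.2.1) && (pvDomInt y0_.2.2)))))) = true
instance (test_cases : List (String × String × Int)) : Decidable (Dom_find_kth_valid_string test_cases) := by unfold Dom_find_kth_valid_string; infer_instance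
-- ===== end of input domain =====

-- B replaces A's two per-string stack-scans-with-break plus set intersection by one flat
-- comprehension over all substrings of A with a direct validity predicate and a substring-in-B
-- test (objective: simpler).


-- ===== PORT A =====
-- inner 'for end in range(start, n)' loop of generate_valid_substrings, with its break
def pvInnerA (s : List Char) (start : Int) : List Int → Int → PySem.Set String → PySem.Set String
  | [], _, acc => acc
  | e :: rest, stack, acc =>
    let stack := if PySem.List.pyGetD s e ' ' = '(' then stack + 1
                 else if PySem.List.pyGetD s e ' ' = ')' then stack - 1 else stack
    if stack < 0 then acc
    else
      let substring := String.ofList (PySem.List.slice s (some start) (some (e + 1)))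
      pvInnerA s start rest stack (if stack = 0 then PySem.Set.add acc substring else acc)

def generate_valid_substrings (s : String) : PySem.Set String :=
  let n := PySem.Str.len s
  (PySem.List.pyRange 0 n 1).foldl
    (fun acc start => pvInnerA s.toList start (PySem.List.pyRange start n 1) 0 acc)
    PySem.Set.empty

def find_kth_valid_string (test_cases : List (String × String × Int)) : List String :=
  test_cases.foldl (fun results c =>
    let valid_substrings_A := generate_valid_substrings c.1
    let valid_substrings_B := generate_valid_substrings c.2.1
    let common := PySem.Set.inter valid_substrings_A valid_substrings_B
    let vcs := PySem.List.sorted common (fun x => x) false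
    if c.2.2 ≤ (vcs.length : Int) then results ++ [PySem.List.pyGetD vcs (c.2.2 - 1) ""]
    else results ++ ["-1"]) []

-- ===== PORT B =====
def pvIsValidGo (cs : List Char) (bal : Int) : Bool :=
  match cs with
  | [] => bal == 0
  | c :: rest =>
    let bal := if c = '(' then bal + 1 else if c = ')' then bal - 1 else bal
    if bal < 0 then false else pvIsValidGo rest bal

def pvIsValid (t : List Char) : Bool := pvIsValidGo t 0

def pvKthCommon (A B : String) (K : Int) : String :=
  let n := PySem.Str.len A
  let common := PySem.List.sorted
    (PySem.Set.ofList ((PySem.List.pyRange 0 n 1).flatMap (fun i =>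
      ((PySem.List.pyRange (i + 1) (n + 1) 1).filter (fun j =>
          pvIsValid (PySem.List.slice A.toList (some i) (some j)) &&
          PySem.Str.isIn (String.ofList (PySem.List.slice A.toList (some i) (some j))) B)).map
        (fun j => String.ofList (PySem.List.slice A.toList (some i) (some j))))))
    (fun x => x) false
  if K ≤ (common.length : Int) then PySem.List.pyGetD common (K - 1) "" else "-1"

def find_kth_valid_string_alt (test_cases : List (String × String × Int)) : List String :=
  test_cases.map (fun c => pvKthCommon c.1 c.2.1 c.2.2)

-- ===== PRECONDITION & SPEC =====
-- spec-level (port-independent) description of one test case's common valid substrings,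
-- used only to state Pre_: paren balance, validity, and the count of distinct nonempty
-- valid substrings occurring in both strings
def pvBal (cs : List Char) : Int := (cs.map (fun c => if c = '(' then (1 : Int) else if c = ')' then -1 else 0)).sum

def pvValidSpec (cs : List Char) : Bool :=
  ((List.range (cs.length + 1)).all (fun k => decide (0 ≤ pvBal (cs.take k)))) && (pvBal cs == 0)

def pvCommonCount (A B : String) : Nat :=
  ((PySem.Set.ofList ((List.range A.toList.length).flatMap (fun i =>
      (List.range (A.toList.length + 1)).map (fun j => (A.toList.drop i).take (j - i))))).filter
    (fun cs => pvValidSpec cs && !cs.isEmpty && decide (cs <:+: B.toList))).length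

-- Pre_ excludes exactly the inputs on which A raises IndexError: a test case whose K is so
-- negative (K ≤ -|common valid substrings|) that Python's common[K-1] is out of range; B raises there too.
def Pre_find_kth_valid_string (test_cases : List (String × String × Int)) : Prop :=
  ∀ c ∈ test_cases, 1 - (pvCommonCount c.1 c.2.1 : Int) ≤ c.2.2
instance (test_cases : List (String × String × Int)) : Decidable (Pre_find_kth_valid_string test_cases) := by unfold Pre_find_kth_valid_string; infer_instance
def pvWitness_find_kth_valid_string : (List (String × String × Int)) := [("()", "()", 1)]

def Spec_find_kth_valid_string (test_cases : List (String × String × Int)) (out : List String) : Prop := out = find_kth_valid_string_alt test_cases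
instance (test_cases : List (String × String × Int)) (out : List String) : Decidable (Spec_find_kth_valid_string test_cases out) := by unfold Spec_find_kth_valid_string; infer_instance

-- ===== CLAIM (what is proved, stated in full; the proofs are below) =====
def Claim_equal_find_kth_valid_string : Prop := ∀ (test_cases : List (String × String × Int)), Dom_find_kth_valid_string test_cases → Pre_find_kth_valid_string test_cases → Spec_find_kth_valid_string test_cases (find_kth_valid_string test_cases)

-- ===== LEMMAS AND PROOFS =====

theorem pvBal_append (u v : List Char) : pvBal (u ++ v) = pvBal u + pvBal v := by
  simp [pvBal]

theorem pvIsValidGo_iff (cs : List Char) (b : Int) (hb : 0 ≤ b) :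
    pvIsValidGo cs b = true ↔ (∀ k ≤ cs.length, 0 ≤ b + pvBal (cs.take k)) ∧ b + pvBal cs = 0 := by
  induction cs generalizing b with
  | nil => simp [pvIsValidGo, pvBal]; omega
  | cons c rest ih =>
    simp only [pvIsValidGo]
    set b' := if c = '(' then b + 1 else if c = ')' then b - 1 else b with hb'
    have hbal : pvBal [c] = b' - b := by
      rw [hb']
      simp only [pvBal, List.map_cons, List.map_nil, List.sum_cons, List.sum_nil]
      split_ifs <;> omega
    by_cases hneg : b' < 0
    · simp only [if_pos hneg]
      constructor
      · intro h; exact absurd h (by simp)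
      · rintro ⟨h1, _⟩
        have := h1 1 (by simp)
        have : pvBal ((c :: rest).take 1) = b' - b := by simpa using hbal
        omega
    · simp only [if_neg hneg]
      rw [ih b' (by omega)]
      constructor
      · rintro ⟨h1, h2⟩
        refine ⟨?_, ?_⟩
        · intro k hk
          match k with
          | 0 => simpa [pvBal] using hb
          | (k'+1) =>
            have := h1 k' (by simpa using hk)
            have ht : (c :: rest).take (k'+1) = c :: rest.take k' := rfl
            rw [ht]
            have : pvBal (c :: rest.take k') = (b' - b) + pvBal (rest.take k') := by
              have : c :: rest.take k' = [c] ++ rest.take k' := rfl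
              rw [this, pvBal_append, hbal]
            omega
        · have : pvBal (c :: rest) = (b' - b) + pvBal rest := by
            have hh : c :: rest = [c] ++ rest := rfl
            rw [hh, pvBal_append, hbal]
          omega
      · rintro ⟨h1, h2⟩
        refine ⟨?_, ?_⟩
        · intro k hk
          have := h1 (k+1) (by simpa using hk)
          have ht : (c :: rest).take (k+1) = c :: rest.take k := rfl
          rw [ht] at this
          have hx : pvBal (c :: rest.take k) = (b' - b) + pvBal (rest.take k) := by
            have hh : c :: rest.take k = [c] ++ rest.take k := rfl
            rw [hh, pvBal_append, hbal]
          omega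
        · have : pvBal (c :: rest) = (b' - b) + pvBal rest := by
            have hh : c :: rest = [c] ++ rest := rfl
            rw [hh, pvBal_append, hbal]
          omega

theorem pvIsValid_iff (cs : List Char) :
    pvIsValid cs = true ↔ (∀ k ≤ cs.length, 0 ≤ pvBal (cs.take k)) ∧ pvBal cs = 0 := by
  have := pvIsValidGo_iff cs 0 le_rfl
  simpa [pvIsValid] using this

theorem pvInnerA_mem (s : List Char) (i : Nat) : ∀ (d e : Nat) (stack : Int) (acc : PySem.Set String) (t : String),
    d = s.length - e →
    i ≤ e →
    stack = pvBal ((s.drop i).take (e - i)) →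
    (∀ k ≤ e - i, 0 ≤ pvBal ((s.drop i).take k)) →
    (t ∈ pvInnerA s (i : Int) (PySem.List.pyRange (e : Int) (s.length : Int) 1) stack acc ↔
      t ∈ acc ∨ ∃ j : Nat, e < j ∧ j ≤ s.length ∧ pvIsValid ((s.drop i).take (j - i)) = true ∧
        t = String.ofList ((s.drop i).take (j - i))) := by
  intro d
  induction d with
  | zero =>
    intro e stack acc t hd hie hst hpre
    have hen : s.length ≤ e := by omega
    have hnil : PySem.List.pyRange (e : Int) (s.length : Int) 1 = [] := by
      rw [List.eq_nil_iff_forall_not_mem]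
      intro x hx
      rw [PySem.List.mem_pyRange_one] at hx
      omega
    rw [hnil]
    simp only [pvInnerA]
    constructor
    · exact Or.inl
    · rintro (h | ⟨j, hj1, hj2, _⟩)
      · exact h
      · omega
  | succ d ih =>
    intro e stack acc t hd hie hst hpre
    have hen : e < s.length := by omega
    have hcons : PySem.List.pyRange (e : Int) (s.length : Int) 1 = (e : Int) :: PySem.List.pyRange ((e : Int) + 1) (s.length : Int) 1 := by
      exact PySem.List.pyRange_one_cons (by exact_mod_cast hen)
    rw [hcons]
    simp only [pvInnerA, PySem.List.pyGetD_natCast]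
    have hch : s.getD e ' ' = s[e] := List.getD_eq_getElem s ' ' hen
    set ch := s[e] with hchdef
    set stack' := if s.getD e ' ' = '(' then stack + 1 else if s.getD e ' ' = ')' then stack - 1 else stack with hst'
    -- the slice s[i:e+1]
    have htake1 : (s.drop i).take (e + 1 - i) = (s.drop i).take (e - i) ++ [ch] := by
      have h1 : e + 1 - i = (e - i) + 1 := by omega
      rw [h1, List.take_add_one]
      have h2 : (s.drop i)[e - i]? = some ch := by
        rw [List.getElem?_drop]
        have h3 : i + (e - i) = e := by omega
        rw [h3]
        exact List.getElem?_eq_getElem hen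
      rw [h2]
      rfl
    have hstack' : stack' = pvBal ((s.drop i).take (e + 1 - i)) := by
      rw [htake1, pvBal_append, ← hst, hst', hch]
      simp only [pvBal, List.map_cons, List.map_nil, List.sum_cons, List.sum_nil]
      split_ifs <;> omega
    have hcast : (e : Int) + 1 = ((e + 1 : Nat) : Int) := by push_cast; ring
    have hslice : PySem.List.slice s (some (i : Int)) (some ((e : Int) + 1)) = (s.drop i).take (e + 1 - i) := by
      rw [hcast, PySem.List.slice_natCast]
    by_cases hneg : stack' < 0
    · rw [if_pos hneg]
      constructor
      · exact Or.inl
      · rintro (h | ⟨j, hj1, hj2, hval, _⟩)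
        · exact h
        · exfalso
          rw [pvIsValid_iff] at hval
          have hlen : e + 1 - i ≤ ((s.drop i).take (j - i)).length := by
            simp [List.length_take, List.length_drop]
            omega
          have := hval.1 (e + 1 - i) hlen
          rw [List.take_take] at this
          have hmin : min (e + 1 - i) (j - i) = e + 1 - i := by omega
          rw [hmin] at this
          omega
    · rw [if_neg hneg]
      rw [hcast]
      rw [hcast] at hslice
      rw [ih (e + 1) stack' _ t (by omega) (by omega) hstack'
          ?pref]
      case pref =>
        intro k hk
        by_cases hke : k ≤ e - i
        · exact hpre k hke
        · have : k = e + 1 - i := by omega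
          rw [this]; omega
      · -- membership bookkeeping
        have hval_e1 : pvIsValid ((s.drop i).take (e + 1 - i)) = true ↔ stack' = 0 := by
          rw [pvIsValid_iff]
          constructor
          · rintro ⟨_, h2⟩; omega
          · intro h0
            refine ⟨?_, by omega⟩
            intro k hk
            have hlen : ((s.drop i).take (e + 1 - i)).length = min (e + 1 - i) (s.length - i) := by
              simp [List.length_take, List.length_drop]
            rw [List.take_take]
            by_cases hke : k ≤ e - i
            · have hmin : min k (e + 1 - i) = k := by omega
              rw [hmin]; exact hpre k hke
            · have hmin : min k (e + 1 - i) = e + 1 - i := by omega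
              rw [hmin, ← hstack']; omega
        constructor
        · rintro (hmem | ⟨j, hj1, hj2, hval, ht⟩)
          · by_cases h0 : stack' = 0
            · rw [if_pos h0] at hmem
              rw [PySem.Set.mem_add] at hmem
              rcases hmem with h | h
              · exact Or.inl h
              · refine Or.inr ⟨e + 1, by omega, by omega, hval_e1.2 h0, ?_⟩
                rw [h, hslice]
            · rw [if_neg h0] at hmem
              exact Or.inl hmem
          · exact Or.inr ⟨j, by omega, hj2, hval, ht⟩
        · rintro (hmem | ⟨j, hj1, hj2, hval, ht⟩)
          · left
            split_ifs with h0
            · rw [PySem.Set.mem_add]; exact Or.inl hmem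
            · exact hmem
          · by_cases hje : j = e + 1
            · subst hje
              left
              have h0 : stack' = 0 := hval_e1.1 hval
              rw [if_pos h0, PySem.Set.mem_add]
              right
              rw [ht, hslice]
            · exact Or.inr ⟨j, by omega, hj2, hval, ht⟩

theorem gvs_fold_mem (s : List Char) (t : String) : ∀ (d a : Nat) (acc : PySem.Set String),
    d = s.length - a →
    (t ∈ (PySem.List.pyRange (a : Int) (s.length : Int) 1).foldl
        (fun acc start => pvInnerA s start (PySem.List.pyRange start (s.length : Int) 1) 0 acc) acc ↔
      t ∈ acc ∨ ∃ i j : Nat, a ≤ i ∧ i < j ∧ j ≤ s.length ∧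
        pvIsValid ((s.drop i).take (j - i)) = true ∧ t = String.ofList ((s.drop i).take (j - i))) := by
  intro d
  induction d with
  | zero =>
    intro a acc hd
    have hnil : PySem.List.pyRange (a : Int) (s.length : Int) 1 = [] := by
      rw [List.eq_nil_iff_forall_not_mem]
      intro x hx
      rw [PySem.List.mem_pyRange_one] at hx
      omega
    rw [hnil]
    simp only [List.foldl_nil]
    constructor
    · exact Or.inl
    · rintro (h | ⟨i, j, h1, h2, h3, _⟩)
      · exact h
      · omega
  | succ d ih =>
    intro a acc hd
    have han : a < s.length := by omega
    rw [PySem.List.pyRange_one_cons (by exact_mod_cast han)]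
    simp only [List.foldl_cons]
    have hacc1 := pvInnerA_mem s a (s.length - a) a 0 acc t rfl le_rfl
      (by rw [Nat.sub_self, List.take_zero]; simp [pvBal])
      (by intro k hk
          rw [Nat.sub_self, Nat.le_zero] at hk
          subst hk
          simp [pvBal])
    have hcast : (a : Int) + 1 = ((a + 1 : Nat) : Int) := by push_cast; ring
    rw [hcast, ih (a + 1) _ (by omega)]
    rw [hacc1]
    constructor
    · rintro ((h | ⟨j, hj1, hj2, hv, ht⟩) | ⟨i, j, h1, h2, h3, hv, ht⟩)
      · exact Or.inl h
      · exact Or.inr ⟨a, j, le_rfl, hj1, hj2, hv, ht⟩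
      · exact Or.inr ⟨i, j, by omega, h2, h3, hv, ht⟩
    · rintro (h | ⟨i, j, h1, h2, h3, hv, ht⟩)
      · exact Or.inl (Or.inl h)
      · by_cases hia : i = a
        · subst hia
          exact Or.inl (Or.inr ⟨j, h2, h3, hv, ht⟩)
        · exact Or.inr ⟨i, j, by omega, h2, h3, hv, ht⟩

theorem gvs_mem (s : String) (t : String) :
    t ∈ generate_valid_substrings s ↔
      pvIsValid t.toList = true ∧ t.toList ≠ [] ∧ t.toList <:+: s.toList := by
  have hlen : PySem.Str.len s = (s.toList.length : Int) := by simp [PySem.Str.len]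
  have h0 : ((0 : Nat) : Int) = (0 : Int) := rfl
  have := gvs_fold_mem s.toList t (s.toList.length - 0) 0 PySem.Set.empty rfl
  rw [h0] at this
  unfold generate_valid_substrings
  rw [hlen, this]
  simp only [PySem.Set.empty]
  constructor
  · rintro (h | ⟨i, j, _, h2, h3, hv, ht⟩)
    · simp at h
    · have htl : t.toList = (s.toList.drop i).take (j - i) := by rw [ht]; simp
      refine ⟨by rw [htl]; exact hv, ?_, ?_⟩
      · rw [htl]
        have hlen3 : ((s.toList.drop i).take (j - i)).length = min (j - i) (s.toList.length - i) := by
          simp only [List.length_take, List.length_drop]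
        intro hnil
        rw [hnil] at hlen3
        simp only [List.length_nil] at hlen3
        omega
      · rw [htl]
        exact ((List.take_prefix _ _).isInfix).trans (s.toList.drop_suffix i).isInfix
  · rintro ⟨hv, hne, hinf⟩
    obtain ⟨u, v, huv⟩ := hinf
    right
    have hdt : (s.toList.drop u.length).take (u.length + t.toList.length - u.length) = t.toList := by
      have h1 : u.length + t.toList.length - u.length = t.toList.length := by omega
      rw [h1, ← huv, List.append_assoc, List.drop_left, List.take_left]
    refine ⟨u.length, u.length + t.toList.length, by omega, by
        have := List.length_pos_iff.mpr hne; omega, ?_, by rw [hdt]; exact hv, by rw [hdt, String.ofList_toList]⟩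
    have hlen2 : (u ++ t.toList ++ v).length = s.toList.length := by rw [huv]
    simp only [List.length_append] at hlen2
    omega

theorem pvInnerA_nodup (s : List Char) (i : Int) : ∀ (ends : List Int) (stack : Int) (acc : PySem.Set String),
    acc.Nodup → (pvInnerA s i ends stack acc).Nodup := by
  intro ends
  induction ends with
  | nil => intro stack acc h; simpa [pvInnerA] using h
  | cons e rest ih =>
    intro stack acc h
    simp only [pvInnerA]
    split_ifs <;>
      first
        | exact h
        | exact ih _ _ (PySem.Set.nodup_add _ _ h)
        | exact ih _ _ h

theorem gvs_nodup (s : String) : (generate_valid_substrings s).Nodup := by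
  have : ∀ (l : List Int) (acc : PySem.Set String), acc.Nodup →
      (l.foldl (fun acc start => pvInnerA s.toList start (PySem.List.pyRange start (PySem.Str.len s) 1) 0 acc) acc).Nodup := by
    intro l
    induction l with
    | nil => intro acc h; simpa using h
    | cons x xs ih => intro acc h; exact ih _ (pvInnerA_nodup _ _ _ _ _ h)
  show (List.foldl (fun acc start => pvInnerA s.toList start (PySem.List.pyRange start (PySem.Str.len s) 1) 0 acc) PySem.Set.empty (PySem.List.pyRange 0 (PySem.Str.len s) 1)).Nodup
  exact this _ PySem.Set.empty (by simp [PySem.Set.empty])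

-- B's candidate list for string A and filter string B

theorem bcommon_mem (A B : String) (t : String) :
    t ∈ PySem.Set.ofList ((PySem.List.pyRange 0 (PySem.Str.len A) 1).flatMap (fun i =>
        ((PySem.List.pyRange (i + 1) (PySem.Str.len A + 1) 1).filter (fun j =>
            pvIsValid (PySem.List.slice A.toList (some i) (some j)) &&
            PySem.Str.isIn (String.ofList (PySem.List.slice A.toList (some i) (some j))) B)).map
          (fun j => String.ofList (PySem.List.slice A.toList (some i) (some j))))) ↔
      (pvIsValid t.toList = true ∧ t.toList ≠ [] ∧ t.toList <:+: A.toList) ∧ PySem.Str.isIn t B = true := by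
  have hlen : PySem.Str.len A = (A.toList.length : Int) := by simp [PySem.Str.len]
  rw [PySem.Set.mem_ofList]
  simp only [List.mem_flatMap, List.mem_map, List.mem_filter, PySem.List.mem_pyRange_one, hlen]
  constructor
  · rintro ⟨i, ⟨hi0, hin⟩, j, ⟨⟨hji, hjn⟩, hcond⟩, ht⟩
    have hi' : i = ((i.toNat : Nat) : Int) := by omega
    have hj' : j = ((j.toNat : Nat) : Int) := by omega
    rw [hi', hj', PySem.List.slice_natCast] at ht hcond
    rw [Bool.and_eq_true] at hcond
    have htl : t.toList = (A.toList.drop i.toNat).take (j.toNat - i.toNat) := by rw [← ht]; simp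
    have hlen3 : ((A.toList.drop i.toNat).take (j.toNat - i.toNat)).length = min (j.toNat - i.toNat) (A.toList.length - i.toNat) := by
      simp only [List.length_take, List.length_drop]
    refine ⟨⟨by rw [htl]; exact hcond.1, ?_, ?_⟩, by rw [← ht]; exact hcond.2⟩
    · intro hnil
      rw [hnil] at htl
      rw [← htl] at hlen3
      simp only [List.length_nil] at hlen3
      omega
    · rw [htl]
      exact ((List.take_prefix _ _).isInfix).trans (A.toList.drop_suffix i.toNat).isInfix
  · rintro ⟨⟨hv, hne, hinf⟩, hin⟩
    obtain ⟨u, v, huv⟩ := hinf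
    have hlen2 : (u ++ t.toList ++ v).length = A.toList.length := by rw [huv]
    simp only [List.length_append] at hlen2
    have hpos := List.length_pos_iff.mpr hne
    have hdt : (A.toList.drop u.length).take (u.length + t.toList.length - u.length) = t.toList := by
      have h1 : u.length + t.toList.length - u.length = t.toList.length := by omega
      rw [h1, ← huv, List.append_assoc, List.drop_left, List.take_left]
    refine ⟨(u.length : Int), ⟨by omega, by omega⟩, ((u.length + t.toList.length : Nat) : Int),
      ⟨⟨by push_cast; omega, by push_cast; omega⟩, ?_⟩, ?_⟩
    · rw [PySem.List.slice_natCast, hdt, Bool.and_eq_true, String.ofList_toList]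
      exact ⟨hv, hin⟩
    · rw [PySem.List.slice_natCast, hdt, String.ofList_toList]

theorem common_sorted_eq (A B : String) :
    PySem.List.sorted (PySem.Set.inter (generate_valid_substrings A) (generate_valid_substrings B)) (fun x => x) false =
    PySem.List.sorted
      (PySem.Set.ofList ((PySem.List.pyRange 0 (PySem.Str.len A) 1).flatMap (fun i =>
        ((PySem.List.pyRange (i + 1) (PySem.Str.len A + 1) 1).filter (fun j =>
            pvIsValid (PySem.List.slice A.toList (some i) (some j)) &&
            PySem.Str.isIn (String.ofList (PySem.List.slice A.toList (some i) (some j))) B)).map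
          (fun j => String.ofList (PySem.List.slice A.toList (some i) (some j))))))
      (fun x => x) false := by
  apply PySem.List.sorted_eq_sorted_of_perm _ _ _ (fun a b h => h)
  rw [List.perm_ext_iff_of_nodup (PySem.Set.nodup_inter _ _ (gvs_nodup A)) (PySem.Set.nodup_ofList _)]
  intro t
  rw [PySem.Set.mem_inter, gvs_mem, gvs_mem, bcommon_mem, PySem.Str.isIn_iff_infix]
  tauto

theorem percase_eq (A B : String) (K : Int) :
    (let vcs := PySem.List.sorted (PySem.Set.inter (generate_valid_substrings A) (generate_valid_substrings B)) (fun x => x) false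
     if K ≤ (vcs.length : Int) then PySem.List.pyGetD vcs (K - 1) "" else "-1") = pvKthCommon A B K := by
  unfold pvKthCommon
  dsimp only
  rw [common_sorted_eq A B]

theorem fold_eq (tc : List (String × String × Int)) : ∀ acc : List String,
    tc.foldl (fun results c =>
      let valid_substrings_A := generate_valid_substrings c.1
      let valid_substrings_B := generate_valid_substrings c.2.1
      let common := PySem.Set.inter valid_substrings_A valid_substrings_B
      let vcs := PySem.List.sorted common (fun x => x) false
      if c.2.2 ≤ (vcs.length : Int) then results ++ [PySem.List.pyGetD vcs (c.2.2 - 1) ""]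
      else results ++ ["-1"]) acc = acc ++ tc.map (fun c => pvKthCommon c.1 c.2.1 c.2.2) := by
  induction tc with
  | nil => intro acc; simp
  | cons c rest ih =>
    intro acc
    simp only [List.foldl_cons, List.map_cons]
    rw [ih _]
    have hc := percase_eq c.1 c.2.1 c.2.2
    dsimp only at hc
    rw [show (if c.2.2 ≤ ((PySem.List.sorted (PySem.Set.inter (generate_valid_substrings c.1) (generate_valid_substrings c.2.1)) (fun x => x) false).length : Int)
          then acc ++ [PySem.List.pyGetD (PySem.List.sorted (PySem.Set.inter (generate_valid_substrings c.1) (generate_valid_substrings c.2.1)) (fun x => x) false) (c.2.2 - 1) ""]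
          else acc ++ ["-1"]) =
        acc ++ [if c.2.2 ≤ ((PySem.List.sorted (PySem.Set.inter (generate_valid_substrings c.1) (generate_valid_substrings c.2.1)) (fun x => x) false).length : Int)
          then PySem.List.pyGetD (PySem.List.sorted (PySem.Set.inter (generate_valid_substrings c.1) (generate_valid_substrings c.2.1)) (fun x => x) false) (c.2.2 - 1) ""
          else "-1"] from by split_ifs <;> rfl]
    rw [hc]
    simp

-- ===== VERDICT (by name: the statement is the Claim_ definition above) =====
theorem find_kth_valid_string_spec : Claim_equal_find_kth_valid_string := by
  intro tc _hdom _hpre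
  unfold Spec_find_kth_valid_string find_kth_valid_string find_kth_valid_string_alt
  rw [fold_eq tc []]
  rfl
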